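-- pv_equiv track=rewrite | github.com/siddiqui-amaan-m/SolanaTelegramBot | pythonProject/hello.py | are_dicts_equal_except_first
-- ===== SOURCE A (Python) =====
-- def are_dicts_equal_except_first(dict1, dict2):
--     # Check if the keys are the same
--     if set(dict1.keys()) != set(dict2.keys()):
--         return False
--
--     # Check if the values for each key (except the first one) are the same
--     keys = list(dict1.keys())[1:]  # Exclude the first key
--     for key in keys:
--         if dict1[key] != dict2[key]:
--             return False
--
--     return True
-- ===== SOURCE B (Python) =====
-- def are_dicts_equal_except_first(dict1, dict2):
--     # Sizes must match; then drop dict1's first key from BOTH dicts and compare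
--     # the remainders wholesale as dicts (one == subsumes key-set and value checks).
--     if len(dict1) != len(dict2):
--         return False
--     first = next(iter(dict1), None)
--     d1 = {k: v for k, v in dict1.items() if k != first}
--     d2 = {k: v for k, v in dict2.items() if k != first}
--     return d1 == d2
-- ===== Notes on version B (the rewrite author's own statement) =====
-- stated objective: simpler
-- what changed: A compares the two key sets and then runs a per-key loop indexing both dicts over keys[1:]; B instead guards on equal sizes, builds two filtered dicts that drop dict1's first key from each side by comprehension, and returns a single wholesale dict equality d1 == d2 that subsumes both of A's checks.
import Mathlib
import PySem

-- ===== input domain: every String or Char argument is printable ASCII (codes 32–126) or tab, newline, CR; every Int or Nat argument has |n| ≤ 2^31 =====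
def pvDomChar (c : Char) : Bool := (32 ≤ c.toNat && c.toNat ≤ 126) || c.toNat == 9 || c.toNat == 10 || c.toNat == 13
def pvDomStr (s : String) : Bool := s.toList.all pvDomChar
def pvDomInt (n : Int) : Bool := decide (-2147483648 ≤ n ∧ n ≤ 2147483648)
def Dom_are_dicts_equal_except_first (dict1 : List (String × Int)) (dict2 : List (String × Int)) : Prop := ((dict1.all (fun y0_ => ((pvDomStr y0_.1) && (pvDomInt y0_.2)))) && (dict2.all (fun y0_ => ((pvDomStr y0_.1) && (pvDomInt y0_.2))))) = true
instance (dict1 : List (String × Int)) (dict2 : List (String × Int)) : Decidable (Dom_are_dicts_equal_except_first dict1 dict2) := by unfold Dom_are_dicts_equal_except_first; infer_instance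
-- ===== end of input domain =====

-- B replaces A's key-set comparison plus per-key value loop by a size guard and a
-- single wholesale equality of the two dicts with dict1's first key dropped (objective: simpler).

-- ===== PORT A =====
-- dict parameters arrive as association lists; PySem.Dict.ofList is dict(...) built from them.
def are_dicts_equal_except_first (dict1 : List (String × Int)) (dict2 : List (String × Int)) : Bool :=
  let d1 := PySem.Dict.ofList dict1
  let d2 := PySem.Dict.ofList dict2
  -- if set(dict1.keys()) != set(dict2.keys()): return False
  if PySem.Set.equal (PySem.Set.ofList (PySem.Dict.keys d1)) (PySem.Set.ofList (PySem.Dict.keys d2)) = false then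
    false
  else
    -- keys = list(dict1.keys())[1:]
    let keys := PySem.List.slice (PySem.Dict.keys d1) (some 1) none
    -- for key in keys: if dict1[key] != dict2[key]: return False / return True
    -- (dict1[key]/dict2[key] cannot raise here: key sets are equal and key ∈ keys; getD default is never read)
    keys.all (fun k => PySem.Dict.getD d1 k 0 == PySem.Dict.getD d2 k 0)

-- ===== PORT B =====
-- Python dict '==' (order-insensitive): same keys as a set, same value at each key.
def pyDictEq (e1 e2 : PySem.Dict String Int) : Bool :=
  PySem.Set.equal (PySem.Set.ofList (PySem.Dict.keys e1)) (PySem.Set.ofList (PySem.Dict.keys e2)) &&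
    (PySem.Dict.keys e1).all (fun k => PySem.Dict.get? e1 k == PySem.Dict.get? e2 k)

def are_dicts_equal_except_first_alt (dict1 : List (String × Int)) (dict2 : List (String × Int)) : Bool :=
  let d1 := PySem.Dict.ofList dict1
  let d2 := PySem.Dict.ofList dict2
  -- if len(dict1) != len(dict2): return False
  if PySem.Dict.size d1 ≠ PySem.Dict.size d2 then false
  else
    -- first = next(iter(dict1), None)
    let first := (PySem.Dict.keys d1).head?
    -- {k: v for k, v in dictI.items() if k != first}
    let e1 := PySem.Dict.ofList ((PySem.Dict.items d1).filter (fun p => !(some p.1 == first)))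
    let e2 := PySem.Dict.ofList ((PySem.Dict.items d2).filter (fun p => !(some p.1 == first)))
    -- return d1 == d2  (dict equality)
    pyDictEq e1 e2

-- ===== PRECONDITION & SPEC =====
def Spec_are_dicts_equal_except_first (dict1 : List (String × Int)) (dict2 : List (String × Int)) (out : Bool) : Prop := out = are_dicts_equal_except_first_alt dict1 dict2
instance (dict1 : List (String × Int)) (dict2 : List (String × Int)) (out : Bool) : Decidable (Spec_are_dicts_equal_except_first dict1 dict2 out) := by unfold Spec_are_dicts_equal_except_first; infer_instance

-- ===== CLAIM (what is proved, stated in full; the proofs are below) =====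
def Claim_equal_are_dicts_equal_except_first : Prop := ∀ (dict1 : List (String × Int)) (dict2 : List (String × Int)), Dom_are_dicts_equal_except_first dict1 dict2 → Spec_are_dicts_equal_except_first dict1 dict2 (are_dicts_equal_except_first dict1 dict2)

-- ===== LEMMAS AND PROOFS =====

theorem items_ofList_nodup (l : List (String × Int)) (h : (l.map Prod.fst).Nodup) :
    (PySem.Dict.ofList l).items = l := by
  have := PySem.Dict.items_foldl_insert_fresh (l := l) (k := Prod.fst) (v := Prod.snd)
    (d := (PySem.Dict.empty : PySem.Dict String Int)) (by intro a _; simp) h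
  simpa [PySem.Dict.ofList] using this

theorem map_fst_filter (l : List (String × Int)) (first : Option String) :
    (l.filter (fun p => !(some p.1 == first))).map Prod.fst
      = (l.map Prod.fst).filter (fun k => !(some k == first)) := by
  induction l with
  | nil => simp
  | cons a t ih => by_cases h : (!(some a.1 == first)) = true <;> simp [h, ih]

theorem map_fst_items (d : PySem.Dict String Int) :
    (PySem.Dict.items d).map Prod.fst = PySem.Dict.keys d := by
  simp [PySem.Dict.keys]

theorem nodup_fst_filtered (d : PySem.Dict String Int) (hnd : (PySem.Dict.keys d).Nodup)
    (first : Option String) :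
    (((PySem.Dict.items d).filter (fun p => !(some p.1 == first))).map Prod.fst).Nodup := by
  rw [map_fst_filter, map_fst_items]
  exact hnd.filter _

theorem keys_filtered (d : PySem.Dict String Int) (hnd : (PySem.Dict.keys d).Nodup) (first : Option String) :
    (PySem.Dict.ofList ((PySem.Dict.items d).filter (fun p => !(some p.1 == first)))).keys
      = (PySem.Dict.keys d).filter (fun k => !(some k == first)) := by
  have h1 : (PySem.Dict.ofList ((PySem.Dict.items d).filter (fun p => !(some p.1 == first)))).keys
      = ((PySem.Dict.items d).filter (fun p => !(some p.1 == first))).map Prod.fst := by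
    rw [← map_fst_items, items_ofList_nodup _ (nodup_fst_filtered d hnd first)]
  rw [h1, map_fst_filter, map_fst_items]

theorem get?_filtered (d : PySem.Dict String Int) (hnd : (PySem.Dict.keys d).Nodup)
    (first : Option String) (k : String) :
    (PySem.Dict.ofList ((PySem.Dict.items d).filter (fun p => !(some p.1 == first)))).get? k
      = if some k = first then none else PySem.Dict.get? d k := by
  set e := PySem.Dict.ofList ((PySem.Dict.items d).filter (fun p => !(some p.1 == first))) with he
  have hek : e.keys = (PySem.Dict.keys d).filter (fun k => !(some k == first)) := keys_filtered d hnd first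
  have hend : e.keys.Nodup := by rw [hek]; exact hnd.filter _
  by_cases hf : some k = first
  · rw [if_pos hf, PySem.Dict.get?_eq_none_iff_not_mem_keys, hek]
    simp [hf]
  · rw [if_neg hf]
    cases hd : PySem.Dict.get? d k with
    | none =>
      rw [PySem.Dict.get?_eq_none_iff_not_mem_keys] at hd ⊢
      rw [hek]; intro hmem; exact hd (List.mem_of_mem_filter hmem)
    | some v =>
      have hmem : (k, v) ∈ (PySem.Dict.items d).filter (fun p => !(some p.1 == first)) :=
        List.mem_filter.mpr ⟨PySem.Dict.mem_items_of_get?_eq_some d hd, by simp [hf]⟩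
      have hme : (k, v) ∈ e.items := by
        rw [he, items_ofList_nodup _ (nodup_fst_filtered d hnd first)]; exact hmem
      exact PySem.Dict.get?_of_mem_items e hme hend

theorem all_congr_mem' (l : List String) (p q : String → Bool) (h : ∀ x ∈ l, p x = q x) :
    l.all p = l.all q := by
  induction l with
  | nil => rfl
  | cons a t ih =>
    simp only [List.all_cons, h a List.mem_cons_self,
      ih (fun x hx => h x (List.mem_cons_of_mem _ hx))]

theorem dict_size_eq_keys_length' (d : PySem.Dict String Int) :
    PySem.Dict.size d = (PySem.Dict.keys d).length := by
  simp [PySem.Dict.size, PySem.Dict.keys]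

theorem filter_cons_rest (k0 : String) (rest : List String) (hnd : (k0 :: rest).Nodup) :
    (k0 :: rest).filter (fun k => !(some k == some k0)) = rest := by
  rw [List.filter_cons_of_neg (by simp)]
  exact List.filter_eq_self.mpr (fun k hk => by
    have : k ≠ k0 := fun h => (List.nodup_cons.mp hnd).1 (h ▸ hk)
    simp [this])

theorem core_equiv (d1 d2 : PySem.Dict String Int)
    (h1 : (PySem.Dict.keys d1).Nodup) (h2 : (PySem.Dict.keys d2).Nodup) :
    (if PySem.Set.equal (PySem.Set.ofList (PySem.Dict.keys d1)) (PySem.Set.ofList (PySem.Dict.keys d2)) = false then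
      false
    else
      (PySem.List.slice (PySem.Dict.keys d1) (some 1) none).all
        (fun k => PySem.Dict.getD d1 k 0 == PySem.Dict.getD d2 k 0))
    =
    (if PySem.Dict.size d1 ≠ PySem.Dict.size d2 then false
    else
      pyDictEq (PySem.Dict.ofList ((PySem.Dict.items d1).filter (fun p => !(some p.1 == (PySem.Dict.keys d1).head?))))
        (PySem.Dict.ofList ((PySem.Dict.items d2).filter (fun p => !(some p.1 == (PySem.Dict.keys d1).head?))))) := by
  set first := (PySem.Dict.keys d1).head? with hfirst
  set e1 := PySem.Dict.ofList ((PySem.Dict.items d1).filter (fun p => !(some p.1 == first))) with he1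
  set e2 := PySem.Dict.ofList ((PySem.Dict.items d2).filter (fun p => !(some p.1 == first))) with he2
  have hek1 : e1.keys = (PySem.Dict.keys d1).filter (fun k => !(some k == first)) := keys_filtered d1 h1 first
  have hek2 : e2.keys = (PySem.Dict.keys d2).filter (fun k => !(some k == first)) := keys_filtered d2 h2 first
  have hg1 : ∀ k, e1.get? k = if some k = first then none else PySem.Dict.get? d1 k := get?_filtered d1 h1 first
  have hg2 : ∀ k, e2.get? k = if some k = first then none else PySem.Dict.get? d2 k := get?_filtered d2 h2 first
  by_cases hset : ∀ x, x ∈ PySem.Dict.keys d1 ↔ x ∈ PySem.Dict.keys d2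
  · have heq : PySem.Set.equal (PySem.Set.ofList (PySem.Dict.keys d1)) (PySem.Set.ofList (PySem.Dict.keys d2)) = true := by
      rw [PySem.Set.equal_iff]
      intro x; simpa [PySem.Set.mem_ofList] using hset x
    have hperm : (PySem.Dict.keys d1).Perm (PySem.Dict.keys d2) :=
      (List.perm_ext_iff_of_nodup h1 h2).mpr hset
    have hsize : PySem.Dict.size d1 = PySem.Dict.size d2 := by
      rw [dict_size_eq_keys_length', dict_size_eq_keys_length']
      exact hperm.length_eq
    rw [if_neg (by simp [heq]), if_neg (by simp [hsize])]
    have hkeyset : PySem.Set.equal (PySem.Set.ofList e1.keys) (PySem.Set.ofList e2.keys) = true := by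
      rw [PySem.Set.equal_iff]
      intro x
      simp only [PySem.Set.mem_ofList, hek1, hek2, List.mem_filter]
      exact and_congr_left (fun _ => hset x)
    rw [pyDictEq, hkeyset, Bool.true_and, PySem.List.slice_from_one]
    cases hk : PySem.Dict.keys d1 with
    | nil => simp [hek1, hk]
    | cons k0 rest =>
      have hfk : first = some k0 := by rw [hfirst, hk]; rfl
      have hrest : e1.keys = rest := by
        rw [hek1, hk, hfk]
        exact filter_cons_rest k0 rest (hk ▸ h1)
      rw [List.tail_cons, hrest]
      apply all_congr_mem'
      intro k hkmem
      have hkne : k ≠ k0 := by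
        intro h; subst h
        exact (List.nodup_cons.mp (hk ▸ h1)).1 hkmem
      have hk1 : k ∈ PySem.Dict.keys d1 := by rw [hk]; exact List.mem_cons_of_mem _ hkmem
      have hk2 : k ∈ PySem.Dict.keys d2 := (hset k).mp hk1
      obtain ⟨v1, hv1⟩ : ∃ v, PySem.Dict.get? d1 k = some v := by
        cases hv : PySem.Dict.get? d1 k with
        | none => rw [PySem.Dict.get?_eq_none_iff_not_mem_keys] at hv; exact absurd hk1 hv
        | some v => exact ⟨v, rfl⟩
      obtain ⟨v2, hv2⟩ : ∃ v, PySem.Dict.get? d2 k = some v := by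
        cases hv : PySem.Dict.get? d2 k with
        | none => rw [PySem.Dict.get?_eq_none_iff_not_mem_keys] at hv; exact absurd hk2 hv
        | some v => exact ⟨v, rfl⟩
      have hne : ¬ (some k = first) := by rw [hfk]; simp [hkne]
      rw [hg1 k, hg2 k, if_neg hne, if_neg hne, hv1, hv2,
        PySem.Dict.getD_eq_get?_getD, PySem.Dict.getD_eq_get?_getD, hv1, hv2]
      simp
  · have heq : PySem.Set.equal (PySem.Set.ofList (PySem.Dict.keys d1)) (PySem.Set.ofList (PySem.Dict.keys d2)) = false := by
      rw [Bool.eq_false_iff]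
      intro hc
      exact hset fun x => by simpa [PySem.Set.mem_ofList] using ((PySem.Set.equal_iff _ _).mp hc) x
    rw [if_pos heq]
    by_cases hs : PySem.Dict.size d1 = PySem.Dict.size d2
    · rw [if_neg (fun h => h hs)]
      have hlen : (PySem.Dict.keys d2).length ≤ (PySem.Dict.keys d1).length := by
        rw [dict_size_eq_keys_length', dict_size_eq_keys_length'] at hs
        omega
      have hexists : ∃ k ∈ PySem.Dict.keys d1, k ∉ PySem.Dict.keys d2 := by
        by_contra hall
        have hsub : PySem.Dict.keys d1 ⊆ PySem.Dict.keys d2 := fun {x} hx => by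
          by_contra hnx; exact hall ⟨x, hx, hnx⟩
        have hperm := (List.subperm_of_subset h1 hsub).perm_of_length_le hlen
        exact hset ((List.perm_ext_iff_of_nodup h1 h2).mp hperm)
      obtain ⟨k, hk1, hk2⟩ := hexists
      obtain ⟨k0, rest, hk⟩ : ∃ k0 rest, PySem.Dict.keys d1 = k0 :: rest := by
        cases hK : PySem.Dict.keys d1 with
        | nil => rw [hK] at hk1; cases hk1
        | cons a t => exact ⟨a, t, rfl⟩
      have hfk : first = some k0 := by rw [hfirst, hk]; rfl
      have hrest : e1.keys = rest := by
        rw [hek1, hk, hfk]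
        exact filter_cons_rest k0 rest (hk ▸ h1)
      by_cases hkk0 : k = k0
      · subst hkk0
        have he2k : e2.keys = PySem.Dict.keys d2 := by
          rw [hek2, hfk]
          exact List.filter_eq_self.mpr (fun x hx => by
            have : x ≠ k := fun h => hk2 (h ▸ hx)
            simp [this])
        have hkeyset : PySem.Set.equal (PySem.Set.ofList e1.keys) (PySem.Set.ofList e2.keys) = false := by
          rw [Bool.eq_false_iff]
          intro hc
          have hmem : ∀ x, x ∈ e1.keys ↔ x ∈ e2.keys := fun x => by
            simpa [PySem.Set.mem_ofList] using ((PySem.Set.equal_iff _ _).mp hc) x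
          have hnd1 : e1.keys.Nodup := by rw [hek1]; exact h1.filter _
          have hnd2 : e2.keys.Nodup := by rw [he2k]; exact h2
          have hperm := (List.perm_ext_iff_of_nodup hnd1 hnd2).mpr hmem
          have hlen2 := hperm.length_eq
          rw [hrest, he2k] at hlen2
          rw [dict_size_eq_keys_length', dict_size_eq_keys_length', hk] at hs
          simp at hs
          omega
        rw [pyDictEq, hkeyset, Bool.false_and]
      · have hkrest : k ∈ rest := by
          rw [hk] at hk1
          cases hk1 with
          | head => exact absurd rfl hkk0
          | tail _ h => exact h
        have hke1 : k ∈ e1.keys := by rw [hrest]; exact hkrest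
        have hne : ¬ (some k = first) := by rw [hfk]; simp [hkk0]
        obtain ⟨v1, hv1⟩ : ∃ v, PySem.Dict.get? d1 k = some v := by
          cases hv : PySem.Dict.get? d1 k with
          | none => rw [PySem.Dict.get?_eq_none_iff_not_mem_keys] at hv; exact absurd hk1 hv
          | some v => exact ⟨v, rfl⟩
        have hv2 : PySem.Dict.get? d2 k = none := by
          rw [PySem.Dict.get?_eq_none_iff_not_mem_keys]; exact hk2
        have hallf : (e1.keys).all (fun x => e1.get? x == e2.get? x) = false := by
          refine List.all_eq_false.mpr ⟨k, hke1, ?_⟩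
          rw [hg1 k, hg2 k, if_neg hne, if_neg hne, hv1, hv2]
          simp
        rw [pyDictEq, hallf, Bool.and_false]
    · rw [if_pos hs]

theorem main_equiv (dict1 dict2 : List (String × Int)) :
    are_dicts_equal_except_first dict1 dict2 = are_dicts_equal_except_first_alt dict1 dict2 := by
  unfold are_dicts_equal_except_first are_dicts_equal_except_first_alt
  exact core_equiv _ _ (PySem.Dict.nodup_keys_ofList dict1) (PySem.Dict.nodup_keys_ofList dict2)

-- ===== VERDICT (by name: the statement is the Claim_ definition above) =====
theorem are_dicts_equal_except_first_spec : Claim_equal_are_dicts_equal_except_first := by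
  intro dict1 dict2 _
  exact main_equiv dict1 dict2
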